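-- pv_equiv track=rewrite | github.com/ohtjqkd/algorithm | baekjoon/2529.py | max_dfs
-- ===== SOURCE A (Python) =====
-- def max_dfs(br, visited, prev):
--     if len(br) == len(prev)-1:
--         return prev
--     for i in range(9, -1, -1):
--         if visited[i] == 0 :
--             if len(prev) == 0:
--                 visited[i] = 1
--                 prev.append(i)
--             elif br[len(prev)-1] == "<" and prev[-1] < i:
--                 visited[i] = 1
--                 prev.append(i)
--             elif br[len(prev)-1] == ">" and prev[-1] > i:
--                 visited[i] = 1
--                 prev.append(i)
--             else:
--                 return None
--             ret = max_dfs(br, visited, prev)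
--             if ret != None:
--                 return ret
--             prev.pop()
--             visited[i] = 0
-- ===== SOURCE B (Python) =====
-- def max_dfs(br, visited, prev):
--     # Iterative depth-first search with an explicit stack of frame counters
--     # instead of A's recursion; mutates visited/prev in place exactly like A.
--     if len(br) == len(prev) - 1:
--         return prev
--     stack = [9]
--     while stack:
--         i = stack[-1]
--         dead = i < 0
--         if not dead:
--             if visited[i] != 0:
--                 stack[-1] = i - 1
--                 continue
--             if len(prev) > 0:
--                 sign = br[len(prev) - 1]
--                 dead = not ((sign == "<" and prev[-1] < i)
--                             or (sign == ">" and prev[-1] > i))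
--         if dead:
--             stack.pop()
--             if not stack:
--                 return None
--             visited[prev.pop()] = 0
--             stack[-1] -= 1
--             continue
--         visited[i] = 1
--         prev.append(i)
--         if len(br) == len(prev) - 1:
--             return prev
--         stack.append(9)
--     return None
-- ===== Notes on version B (the rewrite author's own statement) =====
-- stated objective: alternative
-- what changed: B replaces A's recursive backtracking by an iterative depth-first search driven by an explicit stack of per-frame digit counters (push a counter on taking a digit, decrement on skip, pop-and-undo on a dead frame), with the same in-place mutation of visited/prev.
import Mathlib
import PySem

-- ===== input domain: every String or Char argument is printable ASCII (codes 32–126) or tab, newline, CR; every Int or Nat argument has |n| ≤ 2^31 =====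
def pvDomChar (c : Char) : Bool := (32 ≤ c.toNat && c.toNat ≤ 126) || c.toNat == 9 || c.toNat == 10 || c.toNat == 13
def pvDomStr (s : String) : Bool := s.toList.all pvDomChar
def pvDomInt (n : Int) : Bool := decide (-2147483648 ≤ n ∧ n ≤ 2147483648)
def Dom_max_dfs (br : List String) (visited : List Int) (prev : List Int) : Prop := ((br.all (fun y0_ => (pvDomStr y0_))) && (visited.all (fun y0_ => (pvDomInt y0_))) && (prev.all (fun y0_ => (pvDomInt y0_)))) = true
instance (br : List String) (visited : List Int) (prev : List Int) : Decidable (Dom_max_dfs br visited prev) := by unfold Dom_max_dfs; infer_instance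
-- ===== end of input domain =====

-- B replaces A's recursive backtracking by an iterative depth-first search over an explicit
-- stack of per-frame digit counters (objective: alternative decomposition, recursion → loop).
-- Both Pythons mutate visited/prev in place identically and restore them on failure; the
-- equivalence proved here is about the return value.


-- ===== PORT A =====
-- Recursion depth is bounded by the number of unvisited digits (≤ 10), so fuel 12 is never
-- exhausted on inputs satisfying Pre_; a branch returning 'none' at 'pyGet? = none' marks a
-- Python IndexError (outside Pre_).
mutual
def aRun (fuel : Nat) (br : List String) (visited prev : List Int) : Option (List Int) :=
  if (br.length : Int) = (prev.length : Int) - 1 then some prev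
  else match fuel with
    | 0 => none
    | f + 1 => aLoop f br visited prev (PySem.List.pyRange 9 (-1) (-1))
termination_by (fuel, 1, 0)

def aLoop (f : Nat) (br : List String) (visited prev : List Int) : List Int → Option (List Int)
  | [] => none
  | i :: rest =>
    match PySem.List.pyGet? visited i with
    | none => none   -- Python raises IndexError here; outside Pre_
    | some v =>
      if v = 0 then
        if prev.length = 0 then
          match aRun f br (visited.set i.toNat 1) (prev ++ [i]) with
          | some r => some r
          | none => aLoop f br visited prev rest
        else
          match PySem.List.pyGet? br ((prev.length : Int) - 1), PySem.List.pyGet? prev (-1) with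
          | some s, some p =>
            if s = "<" ∧ p < i then
              match aRun f br (visited.set i.toNat 1) (prev ++ [i]) with
              | some r => some r
              | none => aLoop f br visited prev rest
            else if s = ">" ∧ p > i then
              match aRun f br (visited.set i.toNat 1) (prev ++ [i]) with
              | some r => some r
              | none => aLoop f br visited prev rest
            else none
          | _, _ => none   -- Python raises IndexError reading br here; outside Pre_
      else aLoop f br visited prev rest
termination_by is => (f, 2, is.length)
end

def max_dfs (br : List String) (visited : List Int) (prev : List Int) : Option (List Int) :=
  aRun 12 br visited prev

-- ===== PORT B =====
-- Source B's while-loop over the explicit stack, one bLoop call per iteration; the fuel argument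
-- is a totality guard only (the initial fuel below always suffices under Pre_, see frameCost_le
-- and the sim lemma in the proofs).
mutual
def bLoop (g : Nat) (br : List String) (visited prev stack : List Int) : Option (List Int) :=
  if hg : g = 0 then none else
  match stack with
  | [] => none                      -- while-loop exit: return None
  | i :: rest =>
    if i < 0 then bPop (g - 1) br visited prev rest      -- dead frame: backtrack
    else match PySem.List.pyGet? visited i with
      | none => none                -- Python raises IndexError here; outside Pre_
      | some v =>
        if v ≠ 0 then bLoop (g - 1) br visited prev ((i - 1) :: rest)   -- skip visited digit
        else
          match (if prev.length = 0 then some true else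
                 match PySem.List.pyGet? br ((prev.length : Int) - 1), PySem.List.pyGet? prev (-1) with
                 | some s, some last => some (decide ((s = "<" ∧ last < i) ∨ (s = ">" ∧ last > i)))
                 | _, _ => none) with
          | none => none            -- Python raises IndexError reading br here; outside Pre_
          | some false => bPop (g - 1) br visited prev rest             -- constraint dead end
          | some true =>            -- take the digit
            if (br.length : Int) = ((prev ++ [i]).length : Int) - 1 then some (prev ++ [i])
            else bLoop (g - 1) br (visited.set i.toNat 1) (prev ++ [i]) (9 :: i :: rest)
termination_by (g, 0)
decreasing_by all_goals omega

def bPop (g : Nat) (br : List String) (visited prev rest : List Int) : Option (List Int) :=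
  match rest with
  | [] => none                      -- stack emptied: return None
  | k :: rest' =>
    match prev.getLast? with
    | none => none                  -- prev.pop() guard; unreachable in any actual run
    | some j => bLoop g br (visited.set j.toNat 0) prev.dropLast ((k - 1) :: rest')
termination_by (g, 1)
end

def max_dfs_alt (br : List String) (visited : List Int) (prev : List Int) : Option (List Int) :=
  if (br.length : Int) = (prev.length : Int) - 1 then some prev
  else bLoop (13 ^ 12 * 11 + 1) br visited prev [9]

-- ===== PRECONDITION & SPEC =====
-- Pre_ excludes exactly the inputs on which the Python A raises IndexError: visited shorter
-- than 10 (unless the base case returns at once), or prev more than one element longer than br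
-- while an unvisited digit forces a read past br's end.
def Pre_max_dfs (br : List String) (visited : List Int) (prev : List Int) : Prop :=
  (br.length : Int) = (prev.length : Int) - 1 ∨
  (10 ≤ visited.length ∧
    (prev.length ≤ br.length + 1 ∨ ∀ i ∈ List.range 10, visited.getD i 1 ≠ 0))
instance (br : List String) (visited : List Int) (prev : List Int) : Decidable (Pre_max_dfs br visited prev) := by unfold Pre_max_dfs; infer_instance

def pvWitness_max_dfs : List String × List Int × List Int :=
  (["<", ">"], [0, 0, 0, 0, 0, 0, 0, 0, 0, 0], [])

def Spec_max_dfs (br : List String) (visited : List Int) (prev : List Int) (out : Option (List Int)) : Prop := out = max_dfs_alt br visited prev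
instance (br : List String) (visited : List Int) (prev : List Int) (out : Option (List Int)) : Decidable (Spec_max_dfs br visited prev out) := by unfold Spec_max_dfs; infer_instance

-- ===== CLAIM (what is proved, stated in full; the proofs are below) =====
def Claim_equal_max_dfs : Prop := ∀ (br : List String) (visited : List Int) (prev : List Int), Dom_max_dfs br visited prev → Pre_max_dfs br visited prev → Spec_max_dfs br visited prev (max_dfs br visited prev)

-- ===== LEMMAS AND PROOFS =====

-- worst-case iteration count of a frame with m candidates left, at A-fuel f
def frameCost : Nat → Nat → Nat
  | _, 0 => 1
  | 0, m + 1 => 2 + frameCost 0 m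
  | f + 1, m + 1 => 2 + frameCost f 10 + frameCost (f + 1) m
termination_by f m => (f, m)

-- the candidate digits m-1, m-2, …, 0 still to try in a frame
def descL : Nat → List Int
  | 0 => []
  | m + 1 => (m : Int) :: descL m

-- the unvisited digit slots
def zeroF (v : List Int) : Finset ℕ := (Finset.range 10).filter (fun k => v.getD k 1 = 0)

-- the simulation relation: the machine from a frame with m candidates left either returns
-- A's frame result, or (frame failed) reaches the backtracking step with bounded fuel loss
def SimConcl (f m : Nat) (br : List String) (visited prev rest : List Int) (g : Nat) : Prop :=
  match aLoop f br visited prev (descL m) with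
  | some r => bLoop g br visited prev (((m : Int) - 1) :: rest) = some r
  | none => ∃ g', g - frameCost f m ≤ g' ∧ g' < g ∧
      bLoop g br visited prev (((m : Int) - 1) :: rest) = bPop g' br visited prev rest

lemma frameCost_le : ∀ f m, frameCost f m ≤ 13 ^ (f + 1) * (m + 1) := by
  intro f
  induction f with
  | zero =>
    intro m
    induction m with
    | zero => simp [frameCost]
    | succ m ih =>
      have h1 : frameCost 0 (m + 1) = 2 + frameCost 0 m := by simp [frameCost]
      rw [h1]
      norm_num at ih ⊢
      omega
  | succ f ihf =>
    intro m
    induction m with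
    | zero =>
      have h1 : frameCost (f + 1) 0 = 1 := by simp [frameCost]
      rw [h1]
      exact Nat.one_le_iff_ne_zero.mpr (by positivity)
    | succ m ihm =>
      have h1 : frameCost (f + 1) (m + 1) = 2 + frameCost f 10 + frameCost (f + 1) m := by
        simp [frameCost]
      rw [h1]
      have h2 := ihf 10
      have hp : (1 : ℕ) ≤ 13 ^ (f + 1) := Nat.one_le_pow _ _ (by norm_num)
      have hpow : 13 ^ (f + 1 + 1) = 13 ^ (f + 1) * 13 := pow_succ 13 (f + 1)
      nlinarith [h2, ihm, hp, hpow]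

lemma descL_ten : descL 10 = PySem.List.pyRange 9 (-1) (-1) := by decide

lemma zeroF_card_le (v : List Int) : (zeroF v).card ≤ 10 := by
  calc (zeroF v).card ≤ (Finset.range 10).card := Finset.card_filter_le _ _
  _ = 10 := Finset.card_range 10

lemma mem_zeroF (v : List Int) (m : Nat) (hm : m < 10) (h : v.getD m 1 = 0) : m ∈ zeroF v := by
  simp only [zeroF, Finset.mem_filter, Finset.mem_range]
  exact ⟨hm, h⟩

lemma zeroF_set (v : List Int) (m : Nat) (hm : m < 10) (hlen : m < v.length) :
    zeroF (v.set m 1) = (zeroF v).erase m := by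
  ext k
  simp only [zeroF, Finset.mem_filter, Finset.mem_range, Finset.mem_erase,
    List.getD_eq_getElem?_getD]
  by_cases hk : k = m
  · subst hk; simp [List.getElem?_set_self hlen]
  · rw [List.getElem?_set_ne (fun h => hk h.symm)]
    tauto

lemma zeroF_card_set (v : List Int) (m : Nat) (hm : m < 10) (hlen : m < v.length)
    (h : v.getD m 1 = 0) : (zeroF (v.set m 1)).card = (zeroF v).card - 1 := by
  rw [zeroF_set v m hm hlen]
  exact Finset.card_erase_of_mem (mem_zeroF v m hm h)

lemma set_restore (v : List Int) (m : Nat) (hlen : m < v.length) (h : v.getD m 1 = 0) :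
    v.set m 0 = v := by
  apply List.ext_getElem?
  intro k
  by_cases hk : m = k
  · subst hk
    have h' : v[m] = 0 := (List.getD_eq_getElem v 1 hlen).symm.trans h
    rw [List.getElem?_set_self hlen, List.getElem?_eq_getElem hlen, h']
  · exact List.getElem?_set_ne hk

lemma sim_frame (f : Nat)
    (IH : f ≠ 0 → ∀ (br : List String) (visited prev rest : List Int) (g : Nat),
      10 ≤ visited.length → (zeroF visited).card ≤ f - 1 →
      ((zeroF visited).card = 0 ∨ prev.length ≤ br.length) →
      (rest ≠ [] → prev ≠ []) →
      frameCost (f - 1) 10 ≤ g →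
      SimConcl (f - 1) 10 br visited prev rest g) :
    ∀ (m : Nat), m ≤ 10 → ∀ (br : List String) (visited prev rest : List Int) (g : Nat),
      10 ≤ visited.length → (zeroF visited).card ≤ f →
      ((zeroF visited).card = 0 ∨ prev.length ≤ br.length) →
      (rest ≠ [] → prev ≠ []) →
      frameCost f m ≤ g →
      SimConcl f m br visited prev rest g := by
  intro m
  induction m with
  | zero =>
    intro hm br visited prev rest g hlen hcard hH hrp hg
    have hfc0 : frameCost f 0 = 1 := by cases f <;> simp [frameCost]
    have hg1 : 1 ≤ g := by omega
    have ha : aLoop f br visited prev (descL 0) = none := by rw [descL, aLoop.eq_def]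
    unfold SimConcl
    rw [ha]
    refine ⟨g - 1, by omega, by omega, ?_⟩
    rw [bLoop.eq_def]
    simp [show g ≠ 0 from by omega]
  | succ m ihm =>
    intro hm br visited prev rest g hlen hcard hH hrp hg
    have hm' : m ≤ 10 := by omega
    have hmlt : m < visited.length := by omega
    have hg0 : g ≠ 0 := by
      have : 2 ≤ frameCost f (m + 1) := by cases f <;> simp [frameCost] <;> omega
      omega
    have hstep : frameCost f m + 1 ≤ frameCost f (m + 1) := by
      cases f <;> simp [frameCost] <;> omega
    have hmn : ¬ ((m : Int) < 0) := by omega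
    have hget : PySem.List.pyGet? visited ((m : ℕ) : Int) = some (visited.getD m 1) := by
      rw [PySem.List.pyGet?_eq_some_getElem visited (by omega) (by exact_mod_cast hmlt),
        List.getD_eq_getElem visited 1 hmlt]
      simp [Int.toNat_natCast]
    have htop : ((↑(m + 1) : Int) - 1) = (m : Int) := by push_cast; ring
    unfold SimConcl
    rw [htop, show descL (m + 1) = (m : Int) :: descL m from rfl]
    by_cases hv0 : visited.getD m 1 = 0
    case neg =>
      have hA : aLoop f br visited prev ((m : Int) :: descL m) = aLoop f br visited prev (descL m) := by
        rw [aLoop.eq_def]; simp [hget, hv0, ← List.getD_eq_getElem?_getD]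
      have hB : bLoop g br visited prev ((m : Int) :: rest)
          = bLoop (g - 1) br visited prev (((m : Int) - 1) :: rest) := by
        rw [bLoop.eq_def]
        simp [hg0, hmn, hget, hv0, ← List.getD_eq_getElem?_getD]
      have hsim := ihm hm' br visited prev rest (g - 1) hlen hcard hH hrp (by omega)
      unfold SimConcl at hsim
      rw [hA]
      cases haL : aLoop f br visited prev (descL m) with
      | some r =>
        simp only [haL] at hsim
        rw [hB]; exact hsim
      | none =>
        simp only [haL] at hsim
        obtain ⟨g', h1, h2, h3⟩ := hsim
        exact ⟨g', by omega, by omega, hB.trans h3⟩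
    case pos =>
      have hmem := mem_zeroF visited m (by omega) hv0
      have hc1 : 0 < (zeroF visited).card := Finset.card_pos.mpr ⟨m, hmem⟩
      obtain ⟨f', rfl⟩ : ∃ f', f = f' + 1 := ⟨f - 1, by omega⟩
      have hHbr : prev.length ≤ br.length := by
        rcases hH with h | h
        · omega
        · exact h
      have hfc : frameCost (f' + 1) (m + 1) = 2 + frameCost f' 10 + frameCost (f' + 1) m := by
        simp [frameCost]
      have hto : ((m : Int)).toNat = m := Int.toNat_natCast m
      have hlen' : 10 ≤ (visited.set m 1).length := by rw [List.length_set]; exact hlen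
      have hcard' : (zeroF (visited.set m 1)).card ≤ f' := by
        rw [zeroF_card_set visited m (by omega) hmlt hv0]; omega
      have hrestore : visited.set m 0 = visited := set_restore visited m hmlt hv0
      have hIH := IH (by omega)
      simp only [Nat.add_sub_cancel] at hIH
      -- the two situations in which the digit m is taken
      have hTake : ∀ (hA : aLoop (f' + 1) br visited prev ((m : Int) :: descL m)
              = match aRun (f' + 1) br (visited.set m 1) (prev ++ [(m : Int)]) with
                | some r => some r
                | none => aLoop (f' + 1) br visited prev (descL m))
          (hB : bLoop g br visited prev ((m : Int) :: rest)
              = if (br.length : Int) = ((prev ++ [(m : Int)]).length : Int) - 1 then some (prev ++ [(m : Int)])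
                else bLoop (g - 1) br (visited.set m 1) (prev ++ [(m : Int)]) (9 :: (m : Int) :: rest)),
          (match aLoop (f' + 1) br visited prev ((m : Int) :: descL m) with
           | some r => bLoop g br visited prev ((m : Int) :: rest) = some r
           | none => ∃ g', g - frameCost (f' + 1) (m + 1) ≤ g' ∧ g' < g ∧
               bLoop g br visited prev ((m : Int) :: rest) = bPop g' br visited prev rest) := by
        intro hA hB
        by_cases hbase : (br.length : Int) = ((prev ++ [(m : Int)]).length : Int) - 1
        case pos =>
          have hAr : aRun (f' + 1) br (visited.set m 1) (prev ++ [(m : Int)]) = some (prev ++ [(m : Int)]) := by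
            rw [aRun.eq_def]
            simp at hbase ⊢
            omega
          have hA2 : aLoop (f' + 1) br visited prev ((m : Int) :: descL m) = some (prev ++ [(m : Int)]) := by
            rw [hA, hAr]
          rw [hA2, hB, if_pos hbase]
        case neg =>
          have hArun : aRun (f' + 1) br (visited.set m 1) (prev ++ [(m : Int)])
              = aLoop f' br (visited.set m 1) (prev ++ [(m : Int)]) (descL 10) := by
            rw [aRun.eq_def, if_neg hbase, descL_ten]
          have hplen : (prev ++ [(m : Int)]).length ≤ br.length := by
            have hb := hbase
            simp only [List.length_append, List.length_cons, List.length_nil] at hb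
            push_cast at hb
            simp only [List.length_append, List.length_cons, List.length_nil]
            omega
          have hchild := hIH br (visited.set m 1) (prev ++ [(m : Int)]) ((m : Int) :: rest) (g - 1)
            hlen' hcard' (Or.inr hplen) (fun _ => by simp) (by omega)
          unfold SimConcl at hchild
          rw [show ((10 : ℕ) : Int) - 1 = (9 : Int) from by norm_num] at hchild
          cases haC : aLoop f' br (visited.set m 1) (prev ++ [(m : Int)]) (descL 10) with
          | some r =>
            simp only [haC] at hchild
            have hA2 : aLoop (f' + 1) br visited prev ((m : Int) :: descL m) = some r := by
              rw [hA, hArun, haC]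
            rw [hA2, hB, if_neg hbase]
            exact hchild
          | none =>
            simp only [haC] at hchild
            obtain ⟨g₁, hb1, hb2, hb3⟩ := hchild
            have hpop : bPop g₁ br (visited.set m 1) (prev ++ [(m : Int)]) ((m : Int) :: rest)
                = bLoop g₁ br visited prev (((m : Int) - 1) :: rest) := by
              rw [bPop.eq_def]
              simp [List.getLast?_concat, List.dropLast_concat, hto, hrestore]
            have hA2 : aLoop (f' + 1) br visited prev ((m : Int) :: descL m)
                = aLoop (f' + 1) br visited prev (descL m) := by
              rw [hA, hArun, haC]
            have hsim := ihm hm' br visited prev rest g₁ hlen hcard hH hrp (by omega)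
            unfold SimConcl at hsim
            rw [hA2]
            cases haL : aLoop (f' + 1) br visited prev (descL m) with
            | some r =>
              simp only [haL] at hsim
              rw [hB, if_neg hbase, hb3, hpop]
              exact hsim
            | none =>
              simp only [haL] at hsim
              obtain ⟨g₂, hc1, hc2, hc3⟩ := hsim
              refine ⟨g₂, by omega, by omega, ?_⟩
              rw [hB, if_neg hbase, hb3, hpop]
              exact hc3
      by_cases hp : prev.length = 0
      case pos =>
        refine hTake ?_ ?_
        · rw [aLoop.eq_def]; simp [hget, hv0, hp, hto, ← List.getD_eq_getElem?_getD]
        · rw [bLoop.eq_def]; simp [hg0, hmn, hget, hv0, hp, hto, ← List.getD_eq_getElem?_getD]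
      case neg =>
        have hpne : prev ≠ [] := fun h => hp (by simp [h])
        obtain ⟨s, hbrg⟩ : ∃ s, PySem.List.pyGet? br ((prev.length : Int) - 1) = some s :=
          ⟨_, PySem.List.pyGet?_eq_some_getElem br (by omega) (by push_cast; omega)⟩
        obtain ⟨p, hlastg⟩ : ∃ p, PySem.List.pyGet? prev (-1) = some p :=
          ⟨_, by rw [PySem.List.pyGet?_neg_one]
                 exact (List.getLast_eq_iff_getLast?_eq_some hpne).mp rfl⟩
        by_cases hok : (s = "<" ∧ p < (m : Int)) ∨ (s = ">" ∧ p > (m : Int))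
        case pos =>
          refine hTake ?_ ?_
          · rcases hok with ⟨h1, h2⟩ | ⟨h1, h2⟩
            · rw [aLoop.eq_def]; simp [hget, hv0, hp, hbrg, hlastg, h1, h2, hto, ← List.getD_eq_getElem?_getD]
            · have hne : ¬ (s = "<" ∧ p < (m : Int)) := by
                rintro ⟨h, -⟩; rw [h1] at h; exact absurd h (by decide)
              rw [aLoop.eq_def]; simp [hget, hv0, hp, hbrg, hlastg, hne, h1, h2, hto, ← List.getD_eq_getElem?_getD]
          · rw [bLoop.eq_def]
            simp [hg0, hmn, hget, hv0, hp, hbrg, hlastg, hok, hto, ← List.getD_eq_getElem?_getD]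
        case neg =>
          rw [not_or] at hok
          have hA : aLoop (f' + 1) br visited prev ((m : Int) :: descL m) = none := by
            rw [aLoop.eq_def]; simp [hget, hv0, hp, hbrg, hlastg, hok.1, hok.2, ← List.getD_eq_getElem?_getD]
          have hB : bLoop g br visited prev ((m : Int) :: rest) = bPop (g - 1) br visited prev rest := by
            rw [bLoop.eq_def]
            simp [hg0, hmn, hget, hv0, hp, hbrg, hlastg, hok.1, hok.2, ← List.getD_eq_getElem?_getD]
          rw [hA]
          exact ⟨g - 1, by omega, by omega, hB⟩

lemma sim (f : Nat) : ∀ (m : Nat), m ≤ 10 → ∀ (br : List String) (visited prev rest : List Int) (g : Nat),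
    10 ≤ visited.length → (zeroF visited).card ≤ f →
    ((zeroF visited).card = 0 ∨ prev.length ≤ br.length) →
    (rest ≠ [] → prev ≠ []) →
    frameCost f m ≤ g →
    SimConcl f m br visited prev rest g := by
  induction f with
  | zero => exact sim_frame 0 (by intro h; exact absurd rfl h)
  | succ f ihf =>
    exact sim_frame (f + 1) (by intro _; simpa using ihf 10 (le_refl 10))

-- ===== VERDICT (by name: the statement is the Claim_ definition above) =====
theorem max_dfs_spec : Claim_equal_max_dfs := by
  intro br visited prev _ hpre
  unfold Spec_max_dfs max_dfs max_dfs_alt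
  by_cases hbase : (br.length : Int) = (prev.length : Int) - 1
  · rw [aRun.eq_def, if_pos hbase, if_pos hbase]
  · rcases hpre with h | ⟨hv, hrest⟩
    · exact absurd h hbase
    have hH : (zeroF visited).card = 0 ∨ prev.length ≤ br.length := by
      rcases hrest with h | h
      · right; push_cast at hbase; omega
      · left
        rw [Finset.card_eq_zero]
        apply Finset.filter_eq_empty_iff.mpr
        intro k hk
        exact h k (List.mem_range.mpr (Finset.mem_range.mp hk))
    have hsim := sim 11 10 (le_refl 10) br visited prev [] (13 ^ 12 * 11 + 1) hv
      (le_trans (zeroF_card_le visited) (by omega)) hH (fun h => absurd rfl h)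
      (le_trans (frameCost_le 11 10) (Nat.le_succ _))
    unfold SimConcl at hsim
    rw [show ((10 : ℕ) : Int) - 1 = (9 : Int) from by norm_num] at hsim
    have hArun : aRun 12 br visited prev = aLoop 11 br visited prev (descL 10) := by
      rw [aRun.eq_def, if_neg hbase, descL_ten]
    rw [hArun, if_neg hbase]
    cases haL : aLoop 11 br visited prev (descL 10) with
    | some r => simp only [haL] at hsim; exact hsim.symm
    | none =>
      simp only [haL] at hsim
      obtain ⟨g', -, -, h3⟩ := hsim
      rw [h3, bPop.eq_def]
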